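-- pv_equiv track=rewrite | github.com/m-kis/merlya | athena_ai/domains/info_request/service.py | _parse_services_from_scan
-- ===== SOURCE A (Python) =====
-- from typing import Any, Dict, List
--
-- def _parse_services_from_scan(scan_result: str) -> List[str]:
--     """
--     Parse scan result to extract service names.
--
--     Args:
--         scan_result: Raw scan output
--
--     Returns:
--         List of detected service names
--     """
--     services = []
--     if not scan_result:
--         return services
--
--     # Service keywords to look for
--     service_keywords = [
--         "mysql", "mariadb", "postgres", "mongodb",
--         "nginx", "apache", "redis", "memcached",
--         "haproxy", "traefik"
--     ]
--
--     lines = scan_result.split('\n')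
--     for line in lines:
--         for service_name in service_keywords:
--             if service_name in line.lower():
--                 if service_name not in services:
--                     services.append(service_name)
--
--     return services
-- ===== SOURCE B (Python) =====
-- from typing import List
--
-- def _parse_services_from_scan(scan_result: str) -> List[str]:
--     """Index-then-bucket rewrite: compute each keyword's earliest matching
--     line index, then emit keywords bucketed by that index in line order."""
--     if not scan_result:
--         return []
--
--     service_keywords = [
--         "mysql", "mariadb", "postgres", "mongodb",
--         "nginx", "apache", "redis", "memcached",
--         "haproxy", "traefik"
--     ]
--
--     lines = [line.lower() for line in scan_result.split('\n')]
--
--     def first_hit(kw):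
--         for i, l in enumerate(lines):
--             if kw in l:
--                 return i
--         return None
--
--     first = [(k, first_hit(k)) for k in service_keywords]
--     return [k for i, _ in enumerate(lines) for (k, fi) in first if fi == i]
-- ===== Notes on version B (the rewrite author's own statement) =====
-- stated objective: alternative
-- what changed: Replaces A's line-major append loop with its membership scan over the growing result by an index-then-bucket decomposition: compute each keyword's earliest matching line index once, then emit keywords bucketed by that index (ties in original keyword order), with no mutable dedup list.
import Mathlib
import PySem

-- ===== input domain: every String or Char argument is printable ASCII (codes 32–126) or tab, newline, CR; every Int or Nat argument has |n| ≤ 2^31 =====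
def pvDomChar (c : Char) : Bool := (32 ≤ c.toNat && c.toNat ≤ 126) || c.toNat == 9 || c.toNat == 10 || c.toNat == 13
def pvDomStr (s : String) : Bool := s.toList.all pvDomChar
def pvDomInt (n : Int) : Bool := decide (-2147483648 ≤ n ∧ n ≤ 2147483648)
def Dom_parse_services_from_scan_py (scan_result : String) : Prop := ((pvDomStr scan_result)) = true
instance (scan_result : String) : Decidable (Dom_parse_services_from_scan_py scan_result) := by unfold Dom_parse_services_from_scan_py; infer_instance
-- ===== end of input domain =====

-- B replaces A's append-with-membership-scan loop by an index-then-bucket decomposition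
-- (earliest-hit line index per keyword, then keywords emitted bucketed by that index); objective: alternative.

-- the literal keyword list both Pythons carry
def pvKeywords : List String :=
  ["mysql", "mariadb", "postgres", "mongodb",
   "nginx", "apache", "redis", "memcached",
   "haproxy", "traefik"]

-- ===== PORT A =====
def parse_services_from_scan_py (scan_result : String) : List String :=
  if scan_result = "" then []
  else
    let lines := (PySem.Str.split? scan_result "\n").getD []
    lines.foldl (fun services line =>
      pvKeywords.foldl (fun services k =>
        if PySem.Str.isIn k (PySem.Str.lower line) then
          if services.contains k then services else services ++ [k]
        else services) services) []

-- ===== PORT B =====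
-- B's inner 'for i, l in enumerate(lines): if kw in l: return i' loop
def pvFirstHitAux : List (Int × String) → String → Option Int
  | [], _ => none
  | (i, l) :: rest, kw => if PySem.Str.isIn kw l then some i else pvFirstHitAux rest kw

def parse_services_from_scan_py_alt (scan_result : String) : List String :=
  if scan_result = "" then []
  else
    let lines := ((PySem.Str.split? scan_result "\n").getD []).map PySem.Str.lower
    let first := pvKeywords.map (fun k => (k, pvFirstHitAux (PySem.List.enumerate lines) k))
    (PySem.List.enumerate lines).flatMap (fun e =>
      (first.filter (fun p => decide (p.2 = some e.1))).map Prod.fst)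

-- ===== PRECONDITION & SPEC =====
def Spec_parse_services_from_scan_py (scan_result : String) (out : List String) : Prop := out = parse_services_from_scan_py_alt scan_result
instance (scan_result : String) (out : List String) : Decidable (Spec_parse_services_from_scan_py scan_result out) := by unfold Spec_parse_services_from_scan_py; infer_instance

-- ===== CLAIM (what is proved, stated in full; the proofs are below) =====
def Claim_equal_parse_services_from_scan_py : Prop := ∀ (scan_result : String), Dom_parse_services_from_scan_py scan_result → Spec_parse_services_from_scan_py scan_result (parse_services_from_scan_py scan_result)

-- ===== LEMMAS AND PROOFS =====

-- canonical form: for each (already lowercased) line in order, the keywords that hit it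
-- and were not seen before
def pvG (seen : String → Bool) : List String → List String
  | [] => []
  | l :: ls =>
      pvKeywords.filter (fun k => PySem.Str.isIn k l && !seen k)
        ++ pvG (fun k => seen k || PySem.Str.isIn k l) ls

lemma pvKeywords_nodup : pvKeywords.Nodup := by decide

lemma pv_flatMap_congr {α β : Type} {xs : List α} {f g : α → List β}
    (h : ∀ x ∈ xs, f x = g x) : xs.flatMap f = xs.flatMap g := by
  induction xs with
  | nil => rfl
  | cons x xs ih =>
      simp only [List.flatMap_cons]
      rw [h x (by simp), ih (fun y hy => h y (by simp [hy]))]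

lemma pvG_congr (a b : String → Bool) (L : List String)
    (h : ∀ k ∈ pvKeywords, a k = b k) : pvG a L = pvG b L := by
  induction L generalizing a b with
  | nil => rfl
  | cons l ls ih =>
      simp only [pvG]
      rw [List.filter_congr (fun k hk => by rw [h k hk]),
          ih _ _ (fun k hk => by rw [h k hk])]

-- A's inner keyword loop appends exactly the fresh hits, in keyword order
lemma pv_inner (c : String → Bool) (ks : List String) (hks : ks.Nodup) (s : List String) :
    ks.foldl (fun services k =>
        if c k then
          if services.contains k then services else services ++ [k]
        else services) s
      = s ++ ks.filter (fun k => c k && !s.contains k) := by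
  induction ks generalizing s with
  | nil => simp
  | cons k ks ih =>
      have hnot : k ∉ ks := (List.nodup_cons.mp hks).1
      have hnd : ks.Nodup := (List.nodup_cons.mp hks).2
      simp only [List.foldl_cons, List.filter_cons]
      cases hc : c k with
      | false =>
          simp only [Bool.false_and, Bool.false_eq_true, reduceIte]
          exact ih hnd s
      | true =>
          cases hm : s.contains k with
          | true =>
              simp only [Bool.not_true, Bool.and_false, Bool.false_eq_true,
                reduceIte]
              exact ih hnd s
          | false =>
              simp only [Bool.not_false, Bool.true_and, Bool.false_eq_true, reduceIte]
              rw [ih hnd (s ++ [k]),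
                  List.filter_congr (p := fun k' => c k' && !(s ++ [k]).contains k')
                    (q := fun k' => c k' && !s.contains k')
                    (fun k' hk' => by
                      have hne : k ≠ k' := fun h => hnot (h ▸ hk')
                      simp [List.contains_eq_mem, List.mem_append, Ne.symm hne])]
              simp

-- A's line loop from accumulator s is s followed by the canonical form
lemma pv_Achar (lines : List String) (s : List String) :
    lines.foldl (fun services line =>
      pvKeywords.foldl (fun services k =>
        if PySem.Str.isIn k (PySem.Str.lower line) then
          if services.contains k then services else services ++ [k]
        else services) services) s
      = s ++ pvG (fun k => s.contains k) (lines.map PySem.Str.lower) := by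
  induction lines generalizing s with
  | nil => simp [pvG]
  | cons l ls ih =>
      simp only [List.foldl_cons, List.map_cons, pvG]
      rw [pv_inner _ _ pvKeywords_nodup s, ih,
          pvG_congr (fun k => (s ++ pvKeywords.filter
              (fun k => PySem.Str.isIn k (PySem.Str.lower l) && !s.contains k)).contains k)
            (fun k => s.contains k || PySem.Str.isIn k (PySem.Str.lower l))
            _
            (fun k hk => by
              cases h1 : s.contains k <;> cases h2 : PySem.Str.isIn k (PySem.Str.lower l) <;>
                simp_all [List.contains_eq_mem, List.mem_append, List.mem_filter]),
          List.append_assoc]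

lemma pv_fha_bound (L : List String) (st : Int) (kw : String) (j : Int)
    (h : pvFirstHitAux (PySem.List.enumerate L st) kw = some j) : st ≤ j := by
  induction L generalizing st with
  | nil => simp [PySem.List.enumerate_nil, pvFirstHitAux] at h
  | cons l ls ih =>
      rw [PySem.List.enumerate_cons] at h
      simp only [pvFirstHitAux] at h
      split at h
      · simp only [Option.some.injEq] at h; omega
      · have := ih (st + 1) h; omega

-- B's bucket-by-first-hit-index comprehension computes the canonical form
lemma pv_Bchar (L : List String) (st : Int) (seen : String → Bool) :
    (PySem.List.enumerate L st).flatMap (fun e =>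
        pvKeywords.filter (fun k =>
          !seen k && decide (pvFirstHitAux (PySem.List.enumerate L st) k = some e.1)))
      = pvG seen L := by
  induction L generalizing st seen with
  | nil => simp [PySem.List.enumerate_nil, pvG]
  | cons l ls ih =>
      rw [PySem.List.enumerate_cons]
      simp only [List.flatMap_cons, pvG]
      congr 1
      · refine List.filter_congr (fun k _ => ?_)
        simp only [pvFirstHitAux]
        by_cases h2 : PySem.Str.isIn k l = true
        · have h2c : PySem.Chars.isIn k.toList l.toList = true := by simpa using h2
          simp [h2c]
        · have h2c : PySem.Chars.isIn k.toList l.toList = false := by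
            simpa using eq_false_of_ne_true h2
          have hne : pvFirstHitAux (PySem.List.enumerate ls (st + 1)) k ≠ some st := by
            intro h; have := pv_fha_bound ls (st + 1) k st h; omega
          simp [h2c, hne]
      · rw [pv_flatMap_congr (g := fun e =>
            pvKeywords.filter (fun k =>
              !(seen k || PySem.Str.isIn k l) &&
                decide (pvFirstHitAux (PySem.List.enumerate ls (st + 1)) k = some e.1)))
            (fun e he => by
              refine List.filter_congr (fun k _ => ?_)
              have hgt : st < e.1 := by
                obtain ⟨m, hm, he'⟩ := (PySem.List.mem_enumerate_iff _ _ _).mp he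
                rw [he']; simp; omega
              simp only [pvFirstHitAux]
              by_cases h2 : PySem.Str.isIn k l = true
              · have h2c : PySem.Chars.isIn k.toList l.toList = true := by simpa using h2
                have hne : (st : Int) ≠ e.1 := by omega
                simp [h2c, hne]
              · have h2c : PySem.Chars.isIn k.toList l.toList = false := by
                  simpa using eq_false_of_ne_true h2
                simp [h2c])]
        exact ih (st + 1) _

-- keyword-pair bookkeeping: filtering the (k, f k) table and projecting is filtering the keywords
lemma pv_fmp (f : String → Option Int) (i : Int) (ks : List String) :
    ((ks.map (fun k => (k, f k))).filter (fun p => decide (p.2 = some i))).map Prod.fst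
      = ks.filter (fun k => decide (f k = some i)) := by
  induction ks with
  | nil => rfl
  | cons k ks ih =>
      simp only [List.map_cons, List.filter_cons]
      cases h : decide (f k = some i) <;> simp_all

-- ===== VERDICT (by name: the statement is the Claim_ definition above) =====
theorem parse_services_from_scan_py_spec : Claim_equal_parse_services_from_scan_py := by
  intro s _
  unfold Spec_parse_services_from_scan_py
  by_cases hs : s = ""
  · simp [parse_services_from_scan_py, parse_services_from_scan_py_alt, hs]
  · simp only [parse_services_from_scan_py, parse_services_from_scan_py_alt, if_neg hs]
    rw [pv_Achar _ []]
    rw [pv_flatMap_congr (fun e _ => pv_fmp _ e.1 pvKeywords)]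
    have hB := pv_Bchar (((PySem.Str.split? s "\n").getD []).map PySem.Str.lower) 0 (fun _ => false)
    simp only [Bool.not_false, Bool.true_and] at hB
    rw [hB]
    exact (List.nil_append _) ▸
      pvG_congr _ _ _ (fun k _ => by simp [List.contains_eq_mem])
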